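-- pv_equiv track=rewrite | github.com/smaskoun/intelligent-marketing-platform-simple-interface | src/services/manual_content_service.py | _detect_call_to_action
-- ===== SOURCE A (Python) =====
-- def _detect_call_to_action(text: str) -> bool:
--     """Detect if text contains call-to-action phrases"""
--     if not text:
--         return False
--
--     cta_phrases = [
--         'contact me', 'call me', 'dm me', 'message me', 'text me',
--         'reach out', 'get in touch', 'let\'s talk', 'let\'s chat',
--         'schedule', 'book', 'visit', 'see more', 'click here',
--         'learn more', 'find out', 'discover', 'explore',
--         'sign up', 'register', 'subscribe', 'follow',
--         'buy now', 'shop now', 'order now', 'get started'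
--     ]
--
--     text_lower = text.lower()
--     return any(phrase in text_lower for phrase in cta_phrases)
-- ===== SOURCE B (Python) =====
-- _CTA = ("contact me|call me|dm me|message me|text me|reach out|get in touch|"
--         "let's talk|let's chat|schedule|book|visit|see more|click here|"
--         "learn more|find out|discover|explore|sign up|register|subscribe|"
--         "follow|buy now|shop now|order now|get started").split('|')
--
--
-- def _detect_call_to_action(text: str) -> bool:
--     """Single left-to-right scan: at each position test whether some CTA phrase starts there."""
--     t = text.lower()
--     return any(any(t.startswith(p, i) for p in _CTA) for i in range(len(t)))
-- ===== Notes on version B (the rewrite author's own statement) =====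
-- stated objective: alternative
-- what changed: Instead of running a separate substring search over the text for each of the 26 CTA phrases, B makes one left-to-right scan over the lowered text and at each position tests whether any phrase starts there; the phrase table is built once by splitting a joined pattern string, and the empty-text guard disappears (the scan is vacuous).
import Mathlib
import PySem

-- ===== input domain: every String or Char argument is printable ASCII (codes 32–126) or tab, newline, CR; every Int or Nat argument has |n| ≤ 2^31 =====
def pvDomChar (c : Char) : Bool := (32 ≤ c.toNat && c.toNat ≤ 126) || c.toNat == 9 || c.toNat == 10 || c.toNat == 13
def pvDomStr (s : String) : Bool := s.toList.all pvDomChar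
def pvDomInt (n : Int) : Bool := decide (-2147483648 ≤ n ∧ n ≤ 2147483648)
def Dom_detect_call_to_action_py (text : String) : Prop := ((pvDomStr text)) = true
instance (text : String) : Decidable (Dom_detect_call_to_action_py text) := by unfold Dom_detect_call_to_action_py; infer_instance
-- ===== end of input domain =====

-- B replaces A's per-phrase substring searches by ONE left-to-right scan of the text, testing at
-- each position whether some CTA phrase starts there (objective: alternative traversal, same cost class).

-- ===== PORT A =====
def ctaPhrases : List String :=
  ["contact me", "call me", "dm me", "message me", "text me",
   "reach out", "get in touch", "let's talk", "let's chat",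
   "schedule", "book", "visit", "see more", "click here",
   "learn more", "find out", "discover", "explore",
   "sign up", "register", "subscribe", "follow",
   "buy now", "shop now", "order now", "get started"]

def detect_call_to_action_py (text : String) : Bool :=
  if text.toList = [] then false          -- 'if not text: return False'
  else
    let text_lower := PySem.Str.lower text
    ctaPhrases.any (fun phrase => PySem.Str.isIn phrase text_lower)

-- ===== PORT B =====
-- '<big>.split("|")': sep ≠ "", so Python's split is exactly Str.split? = some; .getD [] only unwraps the some
def ctaAlt : List String :=
  (PySem.Str.split? ("contact me|call me|dm me|message me|text me|reach out|get in touch|" ++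
    "let's talk|let's chat|schedule|book|visit|see more|click here|" ++
    "learn more|find out|discover|explore|sign up|register|subscribe|" ++
    "follow|buy now|shop now|order now|get started") "|").getD []

def detect_call_to_action_py_alt (text : String) : Bool :=
  let t := PySem.Str.lower text
  -- t.startswith(p, i) with 0 ≤ i is exactly: p.toList is a prefix of t.toList.drop i
  (List.range t.toList.length).any (fun i =>
    ctaAlt.any (fun p => PySem.Chars.startswith (t.toList.drop i) p.toList))

-- ===== PRECONDITION & SPEC =====
def Spec_detect_call_to_action_py (text : String) (out : Bool) : Prop := out = detect_call_to_action_py_alt text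
instance (text : String) (out : Bool) : Decidable (Spec_detect_call_to_action_py text out) := by unfold Spec_detect_call_to_action_py; infer_instance

-- ===== CLAIM (what is proved, stated in full; the proofs are below) =====
def Claim_equal_detect_call_to_action_py : Prop := ∀ (text : String), Dom_detect_call_to_action_py text → Spec_detect_call_to_action_py text (detect_call_to_action_py text)

-- ===== LEMMAS AND PROOFS =====

set_option maxRecDepth 4096 in
theorem ctaAlt_eq : ctaAlt = ctaPhrases := by decide

theorem ctaPhrases_ne_nil : ∀ p ∈ ctaPhrases, p.toList ≠ [] := by decide

-- for a nonempty pattern, an occurrence anywhere is an occurrence starting before the end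
theorem exists_drop_lt (sub tl : List Char) (h : sub ≠ []) :
    (∃ j, sub <+: tl.drop j) ↔ ∃ j < tl.length, sub <+: tl.drop j := by
  constructor
  · rintro ⟨j, hj⟩
    by_cases hlt : j < tl.length
    · exact ⟨j, hlt, hj⟩
    · exfalso
      rw [List.drop_eq_nil_of_le (le_of_not_gt hlt)] at hj
      exact h (List.prefix_nil.mp hj)
  · rintro ⟨j, _, hj⟩; exact ⟨j, hj⟩

-- ===== VERDICT (by name: the statement is the Claim_ definition above) =====
theorem detect_call_to_action_py_spec : Claim_equal_detect_call_to_action_py := by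
  intro text _
  unfold Spec_detect_call_to_action_py detect_call_to_action_py detect_call_to_action_py_alt
  rw [ctaAlt_eq, Bool.eq_iff_iff]
  by_cases hnil : text.toList = []
  · simp [hnil, PySem.Chars.lower]
  · simp only [hnil, ite_false, List.any_eq_true, List.mem_range,
      PySem.Str.isIn_eq, PySem.Chars.isIn_iff_infix, PySem.Str.toList_lower,
      PySem.Chars.startswith_iff]
    constructor
    · rintro ⟨p, hp, hinf⟩
      have h1 : ∃ j, p.toList <+: (PySem.Chars.lower text.toList).drop j := by
        obtain ⟨a, b, hab⟩ := hinf
        refine ⟨a.length, ⟨b, ?_⟩⟩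
        rw [← hab, List.append_assoc, List.drop_left]
      obtain ⟨j, hj, hpre⟩ := (exists_drop_lt _ _ (ctaPhrases_ne_nil p hp)).mp h1
      exact ⟨j, hj, p, hp, hpre⟩
    · rintro ⟨j, _, p, hp, hpre⟩
      obtain ⟨b, hb⟩ := hpre
      refine ⟨p, hp, (PySem.Chars.lower text.toList).take j, b, ?_⟩
      rw [List.append_assoc, hb, List.take_append_drop]
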